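-- pv_equiv track=rewrite | github.com/jdkochian/advent-2024 | day19.py | get_num_ways
-- ===== SOURCE A (Python) =====
-- def get_num_ways(towels, design):
--     # A[i] = solution for design[0:i]
--     # A[i] = sum(design[0:j] in towels, design[j : i] in towels) for all j <= i
--
--     A = [0] * (len(design) + 1)
--     for i in range(1, len(design) + 1):
--         if design[0:i] in towels:
--             A[i] += 1
--         for j in range(i):
--             if design[j:i] in towels:
--                 A[i] += A[j]
--
--     return A[-1]
-- ===== SOURCE B (Python) =====
-- def get_num_ways(towels, design):
--     # Forward "scatter" DP: walk positions left to right and push dp[i] forward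
--     # along every towel that matches at position i, instead of gathering over
--     # all split points j < i.  Iterates over the towels themselves, not over
--     # split points, so cost is O(n * |towels| * L) slice checks vs A's O(n^2)
--     # split-point scan with list membership.
--     n = len(design)
--     ts = set(t for t in towels if t)  # an empty towel never extends a composition
--     dp = [0] * (n + 1)
--     dp[0] = 1
--     for i in range(n):
--         for t in ts:
--             if design[i:i + len(t)] == t:
--                 dp[i + len(t)] += dp[i]
--     return dp[n]
-- ===== Notes on version B (the rewrite author's own statement) =====
-- stated objective: faster
-- what changed: Replaces A's backward gather over all O(n^2) split points (with a list-membership test per split) by a forward scatter DP that walks positions left to right and, for each position, pushes dp[i] forward along every distinct towel that matches there, so the work per position is bounded by the towel set instead of by the position index.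
-- intended difference: On the empty design A returns 0 (its table is seeded with 0 and never touched) while B returns 1, the standard convention that the empty design has exactly one (empty) composition. — e.g. on get_num_ways([], ""): A returns 0, B returns 1
import Mathlib
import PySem

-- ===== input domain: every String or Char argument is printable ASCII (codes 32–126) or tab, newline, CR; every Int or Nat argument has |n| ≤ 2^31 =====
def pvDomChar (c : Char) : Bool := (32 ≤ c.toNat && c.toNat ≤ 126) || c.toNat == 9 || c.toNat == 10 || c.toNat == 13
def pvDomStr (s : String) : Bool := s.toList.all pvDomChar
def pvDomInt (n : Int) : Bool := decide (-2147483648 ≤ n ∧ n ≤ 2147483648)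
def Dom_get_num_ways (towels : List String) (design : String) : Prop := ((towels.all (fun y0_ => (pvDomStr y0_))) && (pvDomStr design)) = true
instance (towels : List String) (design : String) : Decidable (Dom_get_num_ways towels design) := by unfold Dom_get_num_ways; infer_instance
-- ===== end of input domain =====

-- B replaces A's backward gather over all split points j < i by a forward scatter DP that
-- walks positions left to right and pushes dp[i] forward along every distinct towel that
-- matches at position i.

-- ===== PORT A =====
-- body of A's outer loop (one iteration, index i)
def pvAbody (towels : List String) (design : String) (A : List Int) (i : Int) : List Int :=
  let A :=
    if towels.contains (PySem.Str.slice design (some 0) (some i)) then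
      PySem.List.pySetD A i (PySem.List.pyGetD A i 0 + 1)
    else A
  (PySem.List.pyRange 0 i).foldl
    (fun A j =>
      if towels.contains (PySem.Str.slice design (some j) (some i)) then
        PySem.List.pySetD A i (PySem.List.pyGetD A i 0 + PySem.List.pyGetD A j 0)
      else A) A

def get_num_ways (towels : List String) (design : String) : Int :=
  let A0 : List Int := List.replicate (design.toList.length + 1) 0
  let A := (PySem.List.pyRange 1 (PySem.Str.len design + 1)).foldl (pvAbody towels design) A0
  PySem.List.pyGetD A (-1) 0

-- ===== PORT B =====
-- body of B's inner loop (one towel t at position i): 'if design[i:i+len(t)] == t: dp[i+len(t)] += dp[i]'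
def pvBInner (design : String) (dp : List Int) (i : Int) (t : String) : List Int :=
  if PySem.Str.slice design (some i) (some (i + PySem.Str.len t)) == t then
    PySem.List.pySetD dp (i + PySem.Str.len t)
      (PySem.List.pyGetD dp (i + PySem.Str.len t) 0 + PySem.List.pyGetD dp i 0)
  else dp

def get_num_ways_alt (towels : List String) (design : String) : Int :=
  let n : Int := PySem.Str.len design
  let ts : PySem.Set String := PySem.Set.ofList (towels.filter (fun t => t ≠ ""))
  let dp0 : List Int := PySem.List.pySetD (List.replicate (n.toNat + 1) 0) 0 1
  let dp := (PySem.List.pyRange 0 n).foldl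
    (fun dp i => ts.foldl (fun dp t => pvBInner design dp i t) dp) dp0
  PySem.List.pyGetD dp n 0

-- ===== PRECONDITION & SPEC =====
-- On the empty design A returns 0 (its table is seeded with 0 and never touched) while B returns 1,
-- the standard convention that the empty design has exactly one (empty) composition.
def D_get_num_ways (towels : List String) (design : String) : Prop := design = ""
instance (towels : List String) (design : String) : Decidable (D_get_num_ways towels design) := by unfold D_get_num_ways; infer_instance

def Spec_get_num_ways (towels : List String) (design : String) (out : Int) : Prop := ¬ D_get_num_ways towels design → out = get_num_ways_alt towels design
instance (towels : List String) (design : String) (out : Int) : Decidable (Spec_get_num_ways towels design out) := by unfold Spec_get_num_ways; infer_instance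

def pvDiffWitness_get_num_ways : List String × String := ([], "")
def pvDiffWitnessOut_get_num_ways : Int × Int := (0, 1)

-- ===== CLAIM (what is proved, stated in full; the proofs are below) =====
def Claim_unchanged_get_num_ways : Prop := ∀ (towels : List String) (design : String), Dom_get_num_ways towels design → Spec_get_num_ways towels design (get_num_ways towels design)
def Claim_changed_get_num_ways : Prop := Dom_get_num_ways (pvDiffWitness_get_num_ways.1) (pvDiffWitness_get_num_ways.2) ∧ D_get_num_ways (pvDiffWitness_get_num_ways.1) (pvDiffWitness_get_num_ways.2) ∧ get_num_ways (pvDiffWitness_get_num_ways.1) (pvDiffWitness_get_num_ways.2) = pvDiffWitnessOut_get_num_ways.1 ∧ get_num_ways_alt (pvDiffWitness_get_num_ways.1) (pvDiffWitness_get_num_ways.2) = pvDiffWitnessOut_get_num_ways.2 ∧ pvDiffWitnessOut_get_num_ways.1 ≠ pvDiffWitnessOut_get_num_ways.2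
def Claim_exact_get_num_ways : Prop := ∀ (towels : List String) (design : String), Dom_get_num_ways towels design → D_get_num_ways towels design → get_num_ways towels design ≠ get_num_ways_alt towels design

-- ===== LEMMAS AND PROOFS =====

-- the substring design[j:i] as a String (j i : Nat)
def pvSub (d : String) (j i : Nat) : String := PySem.Str.slice d (some (j : Int)) (some (i : Int))

-- "design[j:i] in towels"
def pvC (T : List String) (d : String) (j i : Nat) : Bool := T.contains (pvSub d j i)

-- the common mathematical value: pvWl T d i = [W 0, …, W i] with W 0 = 1,
-- W i = Σ_{j<i} [design[j:i] ∈ towels] · W j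
def pvWl (T : List String) (d : String) : Nat → List Int
  | 0 => [1]
  | i + 1 =>
      let p := pvWl T d i
      p ++ [((List.range (i + 1)).map (fun j => if pvC T d j (i + 1) then p.getD j 0 else 0)).sum]

def pvW (T : List String) (d : String) (i : Nat) : Int := (pvWl T d i).getD i 0

theorem pvWl_length (T : List String) (d : String) (i : Nat) : (pvWl T d i).length = i + 1 := by
  induction i with
  | zero => rfl
  | succ i ih => simp [pvWl, ih]

theorem pvWl_getD (T : List String) (d : String) {j i : Nat} (h : j ≤ i) :
    (pvWl T d i).getD j 0 = pvW T d j := by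
  induction i with
  | zero => interval_cases j; rfl
  | succ i ih =>
    rcases Nat.lt_or_ge j (i + 1) with hj | hj
    · show (pvWl T d i ++ [_]).getD j 0 = pvW T d j
      rw [List.getD_append _ _ _ _ (by rw [pvWl_length]; omega)]
      exact ih (by omega)
    · have : j = i + 1 := by omega
      subst this; rfl

theorem pvW_succ (T : List String) (d : String) (i : Nat) :
    pvW T d (i + 1) = ∑ j ∈ Finset.range (i + 1), (if pvC T d j (i + 1) then pvW T d j else 0) := by
  have h1 : pvW T d (i + 1)
      = ((List.range (i + 1)).map (fun j => if pvC T d j (i + 1) then (pvWl T d i).getD j 0 else 0)).sum := by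
    show (pvWl T d i ++ [_]).getD (i + 1) 0 = _
    have hl := pvWl_length T d i
    rw [show i + 1 = (pvWl T d i).length from hl.symm]
    simp [List.getD_eq_getElem?_getD]
  rw [h1]
  have h2 : ∀ j ∈ List.range (i + 1),
      (if pvC T d j (i + 1) then (pvWl T d i).getD j 0 else 0)
        = (if pvC T d j (i + 1) then pvW T d j else 0) := by
    intro j hj
    rw [pvWl_getD T d (by simpa using Nat.lt_succ_iff.mp (List.mem_range.mp hj))]
  rw [List.map_congr_left h2]
  rfl

-- small pySetD/pyGetD facts
theorem pv_set_set (A : List Int) (i : Nat) (v w : Int) :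
    PySem.List.pySetD (PySem.List.pySetD A (i : Int) v) (i : Int) w = PySem.List.pySetD A (i : Int) w := by
  simp [PySem.List.pySetD_natCast, List.set_set]

theorem pv_set_self (A : List Int) (i : Nat) (h : i < A.length) :
    PySem.List.pySetD A (i : Int) (PySem.List.pyGetD A (i : Int) 0) = A := by
  rw [PySem.List.pySetD_natCast, PySem.List.pyGetD_natCast,
      List.getD_eq_getElem?_getD, List.getElem?_eq_getElem h]
  exact List.set_getElem_self h

theorem pv_pyGetD_neg_one (xs : List Int) (h : xs ≠ []) :
    PySem.List.pyGetD xs (-1) 0 = xs.getD (xs.length - 1) 0 := by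
  have hlen : 0 < xs.length := List.length_pos_iff.mpr h
  unfold PySem.List.pyGetD PySem.List.pyGet? PySem.List.pyIdx?
  rw [if_neg (by omega), if_pos (by omega)]
  simp [List.getD_eq_getElem?_getD]

-- range(a) = [0, …, a-1] with Nat casts
theorem pvRange_zero_cast (m : Nat) :
    PySem.List.pyRange 0 ((m : Nat) : Int) = (List.range m).map (fun t => ((t : Nat) : Int)) := by
  rw [PySem.List.pyRange_one]
  simp

theorem pvRange_one_cast (x : Int) (hx : 0 ≤ x) :
    PySem.List.pyRange 1 (x + 1) = (List.range x.toNat).map (fun t => ((t + 1 : Nat) : Int)) := by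
  rw [PySem.List.pyRange_one]
  have h1 : (x + 1 - 1).toNat = x.toNat := by omega
  rw [h1]
  apply List.map_congr_left
  intro t _
  push_cast
  ring

-- A's inner loop: accumulate into slot i, reading slots j < i
theorem pvInner (T : List String) (d : String) (i : Nat) :
    ∀ (m : Nat), m ≤ i → ∀ (A : List Int), i < A.length →
    (List.range m).foldl
      (fun A (j : Nat) =>
        if T.contains (PySem.Str.slice d (some (j : Int)) (some (i : Int))) then
          PySem.List.pySetD A (i : Int)
            (PySem.List.pyGetD A (i : Int) 0 + PySem.List.pyGetD A (j : Int) 0)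
        else A) A
    = PySem.List.pySetD A (i : Int) (PySem.List.pyGetD A (i : Int) 0 +
        ∑ j ∈ Finset.range m, (if pvC T d j i then PySem.List.pyGetD A (j : Int) 0 else 0)) := by
  intro m
  induction m with
  | zero => intro _ A hA; simpa using (pv_set_self A i hA).symm
  | succ m ih =>
    intro hm A hA
    rw [List.range_succ, List.foldl_append, ih (by omega) A hA]
    simp only [List.foldl_cons, List.foldl_nil]
    have hmi : m ≠ i := by omega
    by_cases hc : T.contains (PySem.Str.slice d (some (m : Int)) (some (i : Int)))
    · rw [if_pos hc]
      rw [PySem.List.pyGetD_pySetD_natCast _ _ _ _ _ hA, PySem.List.pyGetD_pySetD_natCast _ _ _ _ _ hA,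
          if_pos rfl, if_neg hmi, pv_set_set]
      rw [Finset.sum_range_succ]
      have : pvC T d m i = true := hc
      rw [this]
      simp [add_assoc]
    · rw [if_neg hc, Finset.sum_range_succ]
      have : pvC T d m i = false := by simpa [pvC, pvSub] using hc
      rw [this]
      simp

-- the array maintained by A's outer loop, after the iterations i = 1 … k
def pvF (T : List String) (d : String) (n k : Nat) : List Int :=
  (List.range (n + 1)).map (fun j => if j = 0 ∨ k < j then 0 else pvW T d j)

theorem pvF_length (T : List String) (d : String) (n k : Nat) : (pvF T d n k).length = n + 1 := by
  simp [pvF]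

theorem pvF_getD (T : List String) (d : String) (n k : Nat) {j : Nat} (hj : j ≤ n) :
    PySem.List.pyGetD (pvF T d n k) (j : Int) 0 = if j = 0 ∨ k < j then 0 else pvW T d j := by
  rw [PySem.List.pyGetD_natCast, List.getD_eq_getElem?_getD]
  have hjl : j < (pvF T d n k).length := by rw [pvF_length]; omega
  rw [List.getElem?_eq_getElem hjl]
  simp [pvF]

theorem pvF_zero (T : List String) (d : String) (n : Nat) :
    pvF T d n 0 = List.replicate (n + 1) 0 := by
  apply List.ext_getElem
  · simp [pvF]
  · intro j h1 h2
    simp only [pvF, List.getElem_map, List.getElem_range, List.getElem_replicate]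
    have hj : j < n + 1 := by simpa [pvF] using h1
    rw [if_pos (by omega)]

theorem pvF_set (T : List String) (d : String) (n k : Nat) (hk : k + 1 ≤ n) :
    PySem.List.pySetD (pvF T d n k) ((k + 1 : Nat) : Int) (pvW T d (k + 1)) = pvF T d n (k + 1) := by
  rw [PySem.List.pySetD_natCast]
  apply List.ext_getElem
  · simp [pvF]
  · intro j h1 h2
    have hj : j < n + 1 := by simpa [pvF] using h2
    rw [List.getElem_set]
    by_cases hje : k + 1 = j
    · rw [if_pos hje]
      subst hje
      simp [pvF]
    · rw [if_neg hje]
      simp only [pvF, List.getElem_map, List.getElem_range]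
      congr 1
      simp only [eq_iff_iff]
      omega

-- the seed term plus the masked sum is W (k+1)
theorem pvSumH (T : List String) (d : String) (k : Nat) :
    (if pvC T d 0 (k + 1) then (1 : Int) else 0)
      + ∑ j ∈ Finset.range (k + 1), (if pvC T d j (k + 1) then (if j = 0 then (0 : Int) else pvW T d j) else 0)
    = pvW T d (k + 1) := by
  rw [pvW_succ,
      Finset.sum_range_succ' (fun j => if pvC T d j (k + 1) then (if j = 0 then (0 : Int) else pvW T d j) else 0) k,
      Finset.sum_range_succ' (fun j => if pvC T d j (k + 1) then pvW T d j else 0) k]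
  have hsame : ∀ j, (if pvC T d (j + 1) (k + 1) then (if j + 1 = 0 then (0 : Int) else pvW T d (j + 1)) else 0)
      = (if pvC T d (j + 1) (k + 1) then pvW T d (j + 1) else 0) := by
    intro j; simp
  simp only [hsame]
  have h0 : pvW T d 0 = 1 := rfl
  by_cases hc : pvC T d 0 (k + 1) <;> simp [hc, h0] <;> ring

-- one outer iteration of A, from the k-state to the (k+1)-state
theorem pvAstep (T : List String) (d : String) (n k : Nat) (hk : k + 1 ≤ n) :
    pvAbody T d (pvF T d n k) ((k + 1 : Nat) : Int) = pvF T d n (k + 1) := by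
  unfold pvAbody
  have hilen : k + 1 < (pvF T d n k).length := by rw [pvF_length]; omega
  have hgi : PySem.List.pyGetD (pvF T d n k) ((k + 1 : Nat) : Int) 0 = 0 := by
    rw [pvF_getD T d n k (by omega)]
    simp
  have hc0eq : T.contains (PySem.Str.slice d (some 0) (some ((k + 1 : Nat) : Int))) = pvC T d 0 (k + 1) := by
    simp [pvC, pvSub]
  have hs := pvSumH T d k
  rw [pvRange_zero_cast (k + 1), List.foldl_map, hc0eq]
  by_cases hc0 : pvC T d 0 (k + 1) = true
  · rw [if_pos hc0, hgi]
    have hAlen : k + 1 < (PySem.List.pySetD (pvF T d n k) ((k + 1 : Nat) : Int) (0 + 1)).length := by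
      rw [PySem.List.length_pySetD]; exact hilen
    rw [pvInner T d (k + 1) (k + 1) le_rfl _ hAlen]
    rw [PySem.List.pyGetD_pySetD_natCast _ _ _ _ _ hilen, if_pos rfl]
    have hread : ∀ j ∈ Finset.range (k + 1),
        (if pvC T d j (k + 1) = true then PySem.List.pyGetD (PySem.List.pySetD (pvF T d n k) ((k + 1 : Nat) : Int) (0 + 1)) ((j : Nat) : Int) 0 else 0)
          = (if pvC T d j (k + 1) = true then (if j = 0 then (0 : Int) else pvW T d j) else 0) := by
      intro j hj
      have hjk : j < k + 1 := Finset.mem_range.mp hj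
      rw [PySem.List.pyGetD_pySetD_natCast _ _ _ _ _ hilen,
          if_neg (show ¬ (j = k + 1) by omega), pvF_getD T d n k (by omega)]
      have hcond : (j = 0 ∨ k < j) = (j = 0) := by
        simp only [eq_iff_iff]; omega
      simp only [hcond]
    rw [Finset.sum_congr rfl hread, pv_set_set]
    rw [if_pos hc0] at hs
    rw [show (0 : Int) + 1 = 1 from by ring, hs, pvF_set T d n k hk]
  · rw [if_neg hc0]
    rw [pvInner T d (k + 1) (k + 1) le_rfl _ hilen, hgi]
    have hread : ∀ j ∈ Finset.range (k + 1),
        (if pvC T d j (k + 1) = true then PySem.List.pyGetD (pvF T d n k) ((j : Nat) : Int) 0 else 0)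
          = (if pvC T d j (k + 1) = true then (if j = 0 then (0 : Int) else pvW T d j) else 0) := by
      intro j hj
      have hjk : j < k + 1 := Finset.mem_range.mp hj
      rw [pvF_getD T d n k (by omega)]
      have hcond : (j = 0 ∨ k < j) = (j = 0) := by
        simp only [eq_iff_iff]; omega
      simp only [hcond]
    rw [Finset.sum_congr rfl hread]
    rw [if_neg hc0] at hs
    rw [zero_add] at hs ⊢
    rw [hs, pvF_set T d n k hk]

-- A's loop maintains pvF
theorem pvAinv (T : List String) (d : String) :
    ∀ (k : Nat), k ≤ d.toList.length →
    (List.range k).foldl (fun A (t : Nat) => pvAbody T d A ((t + 1 : Nat) : Int))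
      (List.replicate (d.toList.length + 1) 0)
    = pvF T d d.toList.length k := by
  intro k
  induction k with
  | zero => intro _; simp [pvF_zero]
  | succ k ih =>
    intro hk
    rw [List.range_succ, List.foldl_append, ih (by omega)]
    simp only [List.foldl_cons, List.foldl_nil]
    exact pvAstep T d _ k hk

theorem pvA_eq (T : List String) (d : String) :
    get_num_ways T d = if d.toList.length = 0 then 0 else pvW T d d.toList.length := by
  unfold get_num_ways
  simp only [PySem.Str.len_eq]
  rw [pvRange_one_cast _ (by positivity)]
  simp only [List.foldl_map, Int.toNat_natCast]
  rw [pvAinv T d _ le_rfl]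
  rw [pv_pyGetD_neg_one _ (by rw [← List.length_pos_iff, pvF_length]; omega)]
  rw [pvF_length]
  simp only [Nat.add_sub_cancel]
  have hjl : d.toList.length < (pvF T d d.toList.length d.toList.length).length := by
    rw [pvF_length]; omega
  rw [List.getD_eq_getElem?_getD, List.getElem?_eq_getElem hjl]
  simp only [pvF, List.getElem_map, List.getElem_range, Option.getD_some]
  congr 1
  simp only [eq_iff_iff]
  omega

-- ===== B-side =====

-- length of design[j:i]
theorem pvSub_len (d : String) {j i : Nat} (hj : j ≤ i) (hi : i ≤ d.toList.length) :
    (pvSub d j i).toList.length = i - j := by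
  unfold pvSub
  rw [PySem.Str.toList_slice, PySem.Chars.slice_eq_listSlice, PySem.List.length_slice,
      PySem.List.clampIdx_natCast, PySem.List.clampIdx_natCast]
  omega

-- the length of any slice design[i:m]
theorem pvSlice_len (d : String) (i m : Nat) (hi : i ≤ d.toList.length) :
    (PySem.Str.slice d (some (i : Int)) (some (m : Int))).toList.length
      = min m d.toList.length - i := by
  rw [PySem.Str.toList_slice, PySem.Chars.slice_eq_listSlice, PySem.List.length_slice,
      PySem.List.clampIdx_natCast, PySem.List.clampIdx_natCast]
  omega

-- if design[i:i+|t|] = t then the match fits: i + |t| ≤ |design|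
theorem pvMatch_fits (d t : String) (i : Nat) (hi : i ≤ d.toList.length)
    (h : PySem.Str.slice d (some (i : Int)) (some ((i + t.toList.length : Nat) : Int)) = t) :
    i + t.toList.length ≤ d.toList.length := by
  have := pvSlice_len d i (i + t.toList.length) hi
  rw [h] at this
  omega

-- if design[j:i] = t (as strings, j ≤ i ≤ n) then i = j + |t|
theorem pvSub_eq_len (d t : String) {j i : Nat} (hj : j ≤ i) (hi : i ≤ d.toList.length)
    (h : pvSub d j i = t) : i = j + t.toList.length := by
  have := pvSub_len d hj hi
  rw [h] at this
  omega

-- the Int index i + len t is the Nat index i + |t|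
theorem pvIdx_cast (t : String) (i : Nat) :
    ((i : Nat) : Int) + PySem.Str.len t = ((i + t.toList.length : Nat) : Int) := by
  rw [PySem.Str.len_eq]
  push_cast
  ring

-- B's inner loop over a Nodup list of nonempty towels: one forward scatter from slot i
theorem pvScatter (d : String) (i : Nat) (hi : i < d.toList.length) :
    ∀ (L : List String), L.Nodup → (∀ t ∈ L, t ≠ "") →
    ∀ (dp : List Int), dp.length = d.toList.length + 1 →
    (L.foldl (fun dp t => pvBInner d dp (i : Int) t) dp).length = dp.length ∧
    ∀ (m : Nat), m ≤ d.toList.length →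
      PySem.List.pyGetD (L.foldl (fun dp t => pvBInner d dp (i : Int) t) dp) (m : Int) 0
        = PySem.List.pyGetD dp (m : Int) 0
          + (if i < m ∧ pvSub d i m ∈ L then PySem.List.pyGetD dp (i : Int) 0 else 0) := by
  intro L
  induction L with
  | nil =>
    intro _ _ dp hdp
    refine ⟨rfl, fun m _ => ?_⟩
    simp
  | cons t L ih =>
    intro hnd hne dp hdp
    simp only [List.foldl_cons]
    have hnd' : L.Nodup := (List.nodup_cons.mp hnd).2
    have htL : t ∉ L := (List.nodup_cons.mp hnd).1
    have hne' : ∀ u ∈ L, u ≠ "" := fun u hu => hne u (List.mem_cons_of_mem t hu)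
    have htne : t ≠ "" := hne t List.mem_cons_self
    have htlen : 0 < t.toList.length := by
      rw [List.length_pos_iff]
      intro h0
      exact htne (String.toList_eq_nil_iff.mp h0)
    by_cases hmatch : PySem.Str.slice d (some (i : Int)) (some ((i : Int) + PySem.Str.len t)) = t
    · -- the towel matches at i: one slot i + |t| is bumped by dp[i]
      have hmatch' : PySem.Str.slice d (some (i : Int)) (some ((i + t.toList.length : Nat) : Int)) = t := by
        rw [← pvIdx_cast]; exact hmatch
      have hfits : i + t.toList.length ≤ d.toList.length := pvMatch_fits d t i (by omega) hmatch'
      have hstep : pvBInner d dp (i : Int) t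
          = PySem.List.pySetD dp (((i + t.toList.length : Nat) : Int))
              (PySem.List.pyGetD dp (((i + t.toList.length : Nat) : Int)) 0 + PySem.List.pyGetD dp (i : Int) 0) := by
        unfold pvBInner
        rw [if_pos (by simpa using hmatch), pvIdx_cast]
      have hlen1 : (pvBInner d dp (i : Int) t).length = dp.length := by
        rw [hstep, PySem.List.length_pySetD]
      obtain ⟨hL, hG⟩ := ih hnd' hne' (pvBInner d dp (i : Int) t) (by rw [hlen1, hdp])
      refine ⟨by rw [hL, hlen1], fun m hm => ?_⟩
      rw [hG m hm, hstep]
      have hinr : i + t.toList.length < dp.length := by omega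
      have hgeti : PySem.List.pyGetD (PySem.List.pySetD dp ((i + t.toList.length : Nat) : Int)
            (PySem.List.pyGetD dp ((i + t.toList.length : Nat) : Int) 0 + PySem.List.pyGetD dp (i : Int) 0)) (i : Int) 0
          = PySem.List.pyGetD dp (i : Int) 0 := by
        rw [PySem.List.pyGetD_pySetD_natCast _ _ _ _ _ hinr, if_neg (by omega)]
      rw [PySem.List.pyGetD_pySetD_natCast _ _ _ _ _ hinr, hgeti]
      by_cases hmm : m = i + t.toList.length
      · -- this slot is the one bumped by t; t ∉ L so L does not bump it again
        subst hmm
        rw [if_pos rfl]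
        have hsubt : pvSub d i (i + t.toList.length) = t := hmatch'
        have hnotL : pvSub d i (i + t.toList.length) ∉ L := by rw [hsubt]; exact htL
        rw [if_neg (by intro h; exact hnotL h.2)]
        have hmem : i < i + t.toList.length ∧ pvSub d i (i + t.toList.length) ∈ t :: L :=
          ⟨by omega, by rw [hsubt]; exact List.mem_cons_self⟩
        rw [if_pos hmem]
        ring
      · -- a different slot: t does not touch it, and 'sub ∈ L' ↔ 'sub ∈ t :: L' there
        rw [if_neg hmm]
        congr 1
        by_cases him : i < m
        · have hiff : (pvSub d i m ∈ L) ↔ (pvSub d i m ∈ t :: L) := by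
            constructor
            · exact fun h => List.mem_cons_of_mem t h
            · intro h
              rcases List.mem_cons.mp h with h | h
              · exfalso
                have := pvSub_eq_len d t (le_of_lt him) hm h
                omega
              · exact h
          by_cases hin : pvSub d i m ∈ t :: L
          · rw [if_pos ⟨him, hiff.mpr hin⟩, if_pos ⟨him, hin⟩]
          · rw [if_neg (fun h => hin (hiff.mp h.2)), if_neg (fun h => hin h.2)]
        · rw [if_neg (fun h => him h.1), if_neg (fun h => him h.1)]
    · -- no match at i: t changes nothing, and no slot m has design[i:m] = t
      have hstep : pvBInner d dp (i : Int) t = dp := by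
        unfold pvBInner
        rw [if_neg (by simpa using hmatch)]
      rw [hstep]
      obtain ⟨hL, hG⟩ := ih hnd' hne' dp hdp
      refine ⟨hL, fun m hm => ?_⟩
      rw [hG m hm]
      congr 1
      by_cases him : i < m
      · have hiff : (pvSub d i m ∈ L) ↔ (pvSub d i m ∈ t :: L) := by
          constructor
          · exact fun h => List.mem_cons_of_mem t h
          · intro h
            rcases List.mem_cons.mp h with h | h
            · exfalso
              have hmlen := pvSub_eq_len d t (le_of_lt him) hm h
              apply hmatch
              rw [pvIdx_cast, ← hmlen]
              exact h
            · exact h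
        by_cases hin : pvSub d i m ∈ t :: L
        · rw [if_pos ⟨him, hiff.mpr hin⟩, if_pos ⟨him, hin⟩]
        · rw [if_neg (fun h => hin (hiff.mp h.2)), if_neg (fun h => hin h.2)]
      · rw [if_neg (fun h => him h.1), if_neg (fun h => him h.1)]

-- the value held by slot j after k forward iterations
def pvGval (T : List String) (d : String) (k j : Nat) : Int :=
  (if j = 0 then 1 else 0) + ∑ j' ∈ Finset.range (min k j), (if pvC T d j' j then pvW T d j' else 0)

-- the dp array of B after k forward iterations
def pvG (T : List String) (d : String) (k : Nat) : List Int :=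
  (List.range (d.toList.length + 1)).map (pvGval T d k)

theorem pvG_length (T : List String) (d : String) (k : Nat) :
    (pvG T d k).length = d.toList.length + 1 := by
  simp [pvG]

theorem pvG_getD (T : List String) (d : String) (k : Nat) {j : Nat} (hj : j ≤ d.toList.length) :
    PySem.List.pyGetD (pvG T d k) (j : Int) 0 = pvGval T d k j := by
  rw [PySem.List.pyGetD_natCast, List.getD_eq_getElem?_getD]
  have hjl : j < (pvG T d k).length := by rw [pvG_length]; omega
  rw [List.getElem?_eq_getElem hjl]
  simp [pvG]

-- a slot already passed holds the final W value
theorem pvGval_self (T : List String) (d : String) (k : Nat) : pvGval T d k k = pvW T d k := by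
  cases k with
  | zero => rfl
  | succ k =>
    unfold pvGval
    rw [min_self, pvW_succ]
    simp

-- the nonempty distinct towels of T
def pvTs (T : List String) : List String := PySem.Set.ofList (T.filter (fun t => t ≠ ""))

theorem pvTs_nodup (T : List String) : (pvTs T).Nodup := PySem.Set.nodup_ofList _

theorem pvTs_ne (T : List String) : ∀ t ∈ pvTs T, t ≠ "" := by
  intro t ht
  have : t ∈ T.filter (fun t => t ≠ "") := (PySem.Set.mem_ofList _ _).mp ht
  exact of_decide_eq_true (List.mem_filter.mp this).2

-- for a nonempty string s: s ∈ pvTs T ↔ s ∈ T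
theorem pvTs_mem (T : List String) (s : String) (hs : s ≠ "") : (s ∈ pvTs T) ↔ s ∈ T := by
  unfold pvTs
  rw [PySem.Set.mem_ofList, List.mem_filter]
  simp [hs]

-- one forward iteration of B, from the k-state to the (k+1)-state
theorem pvBstep (T : List String) (d : String) (k : Nat) (hk : k < d.toList.length) :
    (pvTs T).foldl (fun dp t => pvBInner d dp ((k : Nat) : Int) t) (pvG T d k) = pvG T d (k + 1) := by
  obtain ⟨hlen, hget⟩ := pvScatter d k hk (pvTs T) (pvTs_nodup T) (pvTs_ne T) (pvG T d k) (pvG_length T d k)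
  apply List.ext_getElem
  · rw [hlen, pvG_length, pvG_length]
  · intro m h1 h2
    have hm : m ≤ d.toList.length := by
      have := h2; rw [pvG_length] at this; omega
    have hL : m < ((pvTs T).foldl (fun dp t => pvBInner d dp ((k : Nat) : Int) t) (pvG T d k)).length := h1
    have hgd : ∀ (xs : List Int) (hx : m < xs.length), xs[m] = PySem.List.pyGetD xs (m : Int) 0 := by
      intro xs hx
      rw [PySem.List.pyGetD_natCast, List.getD_eq_getElem?_getD, List.getElem?_eq_getElem hx]
      rfl
    rw [hgd _ h1, hgd _ h2, hget m hm, pvG_getD T d k hm, pvG_getD T d (k + 1) hm,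
        pvG_getD T d k (le_of_lt hk)]
    rw [pvGval_self T d k]
    unfold pvGval
    by_cases hkm : k < m
    · have hmin1 : min k m = k := by omega
      have hmin2 : min (k + 1) m = k + 1 := by omega
      rw [hmin1, hmin2, Finset.sum_range_succ]
      have hcond : (k < m ∧ pvSub d k m ∈ pvTs T) ↔ pvC T d k m = true := by
        constructor
        · intro ⟨_, hmem⟩
          have : pvSub d k m ∈ T := (pvTs_mem T _ (by
            intro h0
            have := pvSub_len d (le_of_lt hkm) hm
            rw [h0] at this
            simp at this
            omega)).mp hmem
          simpa [pvC] using this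
        · intro hc
          have hmem : pvSub d k m ∈ T := by simpa [pvC] using hc
          refine ⟨hkm, (pvTs_mem T _ ?_).mpr hmem⟩
          intro h0
          have := pvSub_len d (le_of_lt hkm) hm
          rw [h0] at this
          simp at this
          omega
      by_cases hc : pvC T d k m = true
      · rw [if_pos (hcond.mpr hc), if_pos hc]; ring
      · rw [if_neg (fun h => hc (hcond.mp h)), if_neg hc]; ring
    · have hmin : min k m = min (k + 1) m := by omega
      have hno : (if k < m ∧ pvSub d k m ∈ pvTs T then pvW T d k else 0) = 0 :=
        if_neg (fun h => hkm h.1)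
      rw [hmin, hno]
      ring

-- B's loop builds exactly pvG
theorem pvBinv (T : List String) (d : String) :
    ∀ (k : Nat), k ≤ d.toList.length →
    (List.range k).foldl
      (fun dp (i : Nat) => (pvTs T).foldl (fun dp t => pvBInner d dp ((i : Nat) : Int) t) dp)
      (pvG T d 0)
    = pvG T d k := by
  intro k
  induction k with
  | zero => intro _; rfl
  | succ k ih =>
    intro hk
    rw [List.range_succ, List.foldl_append, ih (by omega)]
    simp only [List.foldl_cons, List.foldl_nil]
    exact pvBstep T d k hk

-- B's initial array [1, 0, …, 0] is the 0-state
theorem pvG_zero (T : List String) (d : String) :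
    PySem.List.pySetD (List.replicate (d.toList.length + 1) 0) 0 1 = pvG T d 0 := by
  have h0 : ((0 : Nat) : Int) = (0 : Int) := rfl
  rw [← h0, PySem.List.pySetD_natCast]
  apply List.ext_getElem
  · simp [pvG]
  · intro j h1 h2
    have hj : j < d.toList.length + 1 := by simpa using h1
    rw [List.getElem_set]
    simp only [pvG, List.getElem_map, List.getElem_range, pvGval]
    by_cases hje : 0 = j
    · rw [if_pos hje, if_pos hje.symm]
      simp
    · rw [if_neg hje, if_neg (fun h => hje h.symm)]
      simp

theorem pvB_eq (T : List String) (d : String) :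
    get_num_ways_alt T d = pvW T d d.toList.length := by
  unfold get_num_ways_alt
  simp only [PySem.Str.len_eq]
  rw [pvRange_zero_cast d.toList.length]
  simp only [List.foldl_map, Int.toNat_natCast]
  rw [pvG_zero T d]
  rw [show (PySem.Set.ofList (T.filter (fun t => t ≠ ""))) = pvTs T from rfl]
  rw [pvBinv T d _ le_rfl, pvG_getD T d _ le_rfl, pvGval_self]

-- ===== VERDICT (by name: the statement is the Claim_ definition above) =====
theorem get_num_ways_spec : Claim_unchanged_get_num_ways := by
  intro T d _ hD
  have hne : d.toList.length ≠ 0 := by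
    intro h0
    exact hD (String.toList_eq_nil_iff.mp (List.length_eq_zero_iff.mp h0))
  rw [pvA_eq, pvB_eq, if_neg hne]

theorem get_num_ways_changed : Claim_changed_get_num_ways := by
  unfold Claim_changed_get_num_ways; decide

theorem get_num_ways_tight : Claim_exact_get_num_ways := by
  intro T d _ hD
  have hd : d = "" := hD
  subst hd
  rw [pvA_eq, pvB_eq]
  simp [pvW, pvWl]
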